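-- pv_equiv track=rewrite | github.com/jagaldol/Algorithm-problem-solving | 백준/Gold/1891. 사분면/사분면(재귀).py | to_coordinate
-- ===== SOURCE A (Python) =====
-- def to_coordinate(n: str, d, idx, x, y):
--     if idx == d:
--         return x, y
--
--     position = n[idx]
--     modifier = 2 ** (d - 1 - idx)
--
--     if position == "1":
--         return to_coordinate(n, d, idx + 1, x + modifier, y + modifier)
--     elif position == "2":
--         return to_coordinate(n, d, idx + 1, x, y + modifier)
--     elif position == "3":
--         return to_coordinate(n, d, idx + 1, x, y)
--     elif position == "4":
--         return to_coordinate(n, d, idx + 1, x + modifier, y)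
-- ===== SOURCE B (Python) =====
-- def to_coordinate(n: str, d, idx, x, y):
--     # Iterative re-implementation: one for-loop over the digit positions,
--     # branch-free arithmetic updates instead of a recursive if/elif chain.
--     for k in range(idx, d):
--         c = n[k]
--         m = 2 ** (d - 1 - k)
--         x += m * (c in "14")
--         y += m * (c in "12")
--     return x, y
-- ===== Notes on version B (the rewrite author's own statement) =====
-- stated objective: idiomatic
-- what changed: Replaced the tail recursion with a for-loop over range(idx, d) and replaced the four-way if/elif branch chain by two branch-free arithmetic updates; Pre_ excludes inputs containing a digit outside '1'-'4', where A falls off the if/elif chain and returns None (not an int pair) while B, assuming valid quadrant digits, returns a pair.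
-- outside the precondition, e.g. on to_coordinate('x44yz 93 129bx03', 1, 0, -4, 82): A returns None, B returns (-4, 82); on to_coordinate('5', 1, 0, 0, 0): A returns None, B returns (0, 0)
import Mathlib
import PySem

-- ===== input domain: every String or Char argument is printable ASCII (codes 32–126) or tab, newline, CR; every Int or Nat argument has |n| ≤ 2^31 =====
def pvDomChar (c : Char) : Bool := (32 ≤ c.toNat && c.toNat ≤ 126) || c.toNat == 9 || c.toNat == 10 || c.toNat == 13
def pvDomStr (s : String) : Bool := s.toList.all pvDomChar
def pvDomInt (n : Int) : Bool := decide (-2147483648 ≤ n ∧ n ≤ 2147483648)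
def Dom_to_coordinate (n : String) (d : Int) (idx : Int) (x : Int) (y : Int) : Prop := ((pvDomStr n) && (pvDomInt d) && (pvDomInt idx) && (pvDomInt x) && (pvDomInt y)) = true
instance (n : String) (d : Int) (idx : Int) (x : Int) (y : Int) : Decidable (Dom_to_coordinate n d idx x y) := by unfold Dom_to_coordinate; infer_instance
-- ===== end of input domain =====

-- B replaces A's tail recursion by an iterative loop with branch-free arithmetic updates (idiomatic, same cost).

-- ===== PORT A =====
-- fuel = (d - idx).toNat is exact on every input where the Python recursion terminates normally
-- (idx ≤ d): Python raises (IndexError / float exponent) whenever idx > d, which Pre_ excludes.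
def pvA_go (n : String) (d : Int) : Nat → Int → Int → Int → Int × Int
  | 0, _idx, x, y => (x, y)
  | fuel+1, idx, x, y =>
    if idx = d then (x, y) else
      match PySem.Str.pyGet? n idx with
      | none => (x, y)   -- Python: IndexError (outside Pre_)
      | some c =>
        let m : Int := 2 ^ (d - 1 - idx).toNat
        if c = '1' then pvA_go n d fuel (idx+1) (x+m) (y+m)
        else if c = '2' then pvA_go n d fuel (idx+1) x (y+m)
        else if c = '3' then pvA_go n d fuel (idx+1) x y
        else if c = '4' then pvA_go n d fuel (idx+1) (x+m) y
        else (x, y)      -- Python: falls through, returns None (outside Pre_)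

def to_coordinate (n : String) (d : Int) (idx : Int) (x : Int) (y : Int) : Int × Int :=
  pvA_go n d (d - idx).toNat idx x y

-- ===== PORT B =====
def pvB_step (n : String) (d : Int) (p : Int × Int) (k : Int) : Int × Int :=
  let c := (PySem.Str.pyGet? n k).getD '0'   -- n[k]; always `some` inside Pre_ (else IndexError)
  let m : Int := 2 ^ (d - 1 - k).toNat
  (p.1 + m * (if c = '1' ∨ c = '4' then 1 else 0),
   p.2 + m * (if c = '1' ∨ c = '2' then 1 else 0))

def to_coordinate_alt (n : String) (d : Int) (idx : Int) (x : Int) (y : Int) : Int × Int :=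
  (PySem.List.pyRange idx d 1).foldl (pvB_step n d) (x, y)

-- ===== PRECONDITION & SPEC =====
def pvValidDigit (o : Option Char) : Bool :=
  match o with
  | some c => c ∈ (['1', '2', '3', '4'] : List Char)
  | none => false

-- Pre_ is exactly where Python A returns an int pair: idx ≤ d (otherwise A eventually raises)
-- and every indexed character n[k], k ∈ [idx, d), exists and is a digit '1'-'4'
-- (a missing index raises IndexError; any other character makes A fall through to None).
-- (the index bounds -len ≤ idx and d ≤ len are implied by the per-index condition whenever idx < d;
-- they are stated up front only so the predicate evaluates without enumerating a huge empty-of-hope range)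
def Pre_to_coordinate (n : String) (d : Int) (idx : Int) (x : Int) (y : Int) : Prop :=
  idx ≤ d ∧ (idx = d ∨ (-(n.length : Int) ≤ idx ∧ d ≤ (n.length : Int) ∧
    ∀ k ∈ PySem.List.pyRange idx d 1, pvValidDigit (PySem.Str.pyGet? n k) = true))
instance (n : String) (d : Int) (idx : Int) (x : Int) (y : Int) : Decidable (Pre_to_coordinate n d idx x y) := by unfold Pre_to_coordinate; infer_instance

def pvWitness_to_coordinate : String × Int × Int × Int × Int := ("1423", 4, 0, 0, 0)

def Spec_to_coordinate (n : String) (d : Int) (idx : Int) (x : Int) (y : Int) (out : Int × Int) : Prop := out = to_coordinate_alt n d idx x y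
instance (n : String) (d : Int) (idx : Int) (x : Int) (y : Int) (out : Int × Int) : Decidable (Spec_to_coordinate n d idx x y out) := by unfold Spec_to_coordinate; infer_instance

-- ===== CLAIM (what is proved, stated in full; the proofs are below) =====
def Claim_equal_to_coordinate : Prop := ∀ (n : String) (d : Int) (idx : Int) (x : Int) (y : Int), Dom_to_coordinate n d idx x y → Pre_to_coordinate n d idx x y → Spec_to_coordinate n d idx x y (to_coordinate n d idx x y)

-- ===== LEMMAS AND PROOFS =====

theorem pvWitness_ok :
    Dom_to_coordinate (pvWitness_to_coordinate.1) (pvWitness_to_coordinate.2.1) (pvWitness_to_coordinate.2.2.1) (pvWitness_to_coordinate.2.2.2.1) (pvWitness_to_coordinate.2.2.2.2) ∧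
    Pre_to_coordinate (pvWitness_to_coordinate.1) (pvWitness_to_coordinate.2.1) (pvWitness_to_coordinate.2.2.1) (pvWitness_to_coordinate.2.2.2.1) (pvWitness_to_coordinate.2.2.2.2) := by
  decide

theorem pvA_go_eq_foldl (n : String) (d : Int) :
    ∀ (fuel : Nat) (idx x y : Int), idx ≤ d → fuel = (d - idx).toNat →
    (∀ k ∈ PySem.List.pyRange idx d 1, pvValidDigit (PySem.Str.pyGet? n k) = true) →
    pvA_go n d fuel idx x y = (PySem.List.pyRange idx d 1).foldl (pvB_step n d) (x, y) := by
  intro fuel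
  induction fuel with
  | zero =>
    intro idx x y hle hfuel _
    have hidx : idx = d := by omega
    subst hidx
    simp [pvA_go, PySem.List.pyRange_one_eq_nil le_rfl]
  | succ fuel ih =>
    intro idx x y hle hfuel hvalid
    by_cases hidx : idx = d
    · subst hidx
      simp [pvA_go, PySem.List.pyRange_one_eq_nil le_rfl]
    · have hlt : idx < d := lt_of_le_of_ne hle hidx
      have hcons := PySem.List.pyRange_one_cons hlt
      have hmem : idx ∈ PySem.List.pyRange idx d 1 := by
        rw [hcons]; exact List.mem_cons_self
      have hv := hvalid idx hmem
      rw [hcons]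
      obtain ⟨c, hc⟩ : ∃ c, PySem.Str.pyGet? n idx = some c := by
        cases h : PySem.Str.pyGet? n idx with
        | none => rw [h] at hv; simp [pvValidDigit] at hv
        | some c => exact ⟨c, rfl⟩
      rw [hc] at hv
      have hvalid' : ∀ k ∈ PySem.List.pyRange (idx+1) d 1, pvValidDigit (PySem.Str.pyGet? n k) = true := by
        intro k hk
        exact hvalid k (by rw [hcons]; exact List.mem_cons_of_mem _ hk)
      have hrec : ∀ x' y', pvA_go n d fuel (idx+1) x' y' =
          (PySem.List.pyRange (idx+1) d 1).foldl (pvB_step n d) (x', y') := by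
        intro x' y'
        exact ih (idx+1) x' y' (by omega) (by omega) hvalid'
      simp only [pvValidDigit, List.mem_cons, List.not_mem_nil, or_false, decide_eq_true_eq] at hv
      have hc' : PySem.List.pyGet? n.toList idx = some c := by
        simpa [PySem.Str.pyGet?] using hc
      simp only [pvA_go, if_neg hidx, hc, List.foldl_cons]
      rcases hv with h1 | h2 | h3 | h4 <;> subst_vars <;>
        simp [hrec, pvB_step, hc']
theorem to_coordinate_spec : Claim_equal_to_coordinate := by
  intro n d idx x y _hdom hpre
  obtain ⟨hle, hrest⟩ := hpre
  have hall : ∀ k ∈ PySem.List.pyRange idx d 1, pvValidDigit (PySem.Str.pyGet? n k) = true := by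
    rcases hrest with heq | ⟨_, _, h⟩
    · subst heq; simp [PySem.List.pyRange_one_eq_nil le_rfl]
    · exact h
  unfold Spec_to_coordinate to_coordinate to_coordinate_alt
  exact pvA_go_eq_foldl n d _ idx x y hle rfl hall
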